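-- pv_equiv track=rewrite | github.com/Ryusunshine/Python-AlgorithmPractice | AlgorithmPractice0815.py | teacher
-- ===== SOURCE A (Python) =====
-- def teacher(n, candy):
--     tmp_list = [0 for _ in range(n)]
--     for i in range(n):
--         if candy[i] % 2 == 1:
--             candy[i] += 1
--         tmp_list[(i+1) % n] = candy[i] #오른쪽에 줄값은 내가 가진값의 절반
--         candy[i] //= 2 # 그리고 내꺼는 절반으로 나눈다.
--
--     for i in range(n):
--         candy[i] += tmp_list[i]
--     return candy
-- ===== SOURCE B (Python) =====
-- def teacher(n, candy):
--     if n <= 0: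
--         return candy
--     c = candy[n - 1]
--     prev = c + c % 2          # full even value the left neighbour gives away
--     i = 0
--     while i < n:
--         c = candy[i]
--         a = c + c % 2
--         candy[i] = a // 2 + prev
--         prev = a
--         i += 1
--     return candy
-- ===== Notes on version B (the rewrite author's own statement) =====
-- stated objective: faster
-- what changed: Replaces A's two staged passes and O(n) tmp_list (halve everything while scattering gifts into a rotated temporary array, then a second pass adding it back) by ONE fused pass that threads the previous pile's even-adjusted value as an O(1) accumulator, seeded with the last pile's value for the wrap, writing each final amount directly (no temporary list, single traversal).
import Mathlib
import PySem

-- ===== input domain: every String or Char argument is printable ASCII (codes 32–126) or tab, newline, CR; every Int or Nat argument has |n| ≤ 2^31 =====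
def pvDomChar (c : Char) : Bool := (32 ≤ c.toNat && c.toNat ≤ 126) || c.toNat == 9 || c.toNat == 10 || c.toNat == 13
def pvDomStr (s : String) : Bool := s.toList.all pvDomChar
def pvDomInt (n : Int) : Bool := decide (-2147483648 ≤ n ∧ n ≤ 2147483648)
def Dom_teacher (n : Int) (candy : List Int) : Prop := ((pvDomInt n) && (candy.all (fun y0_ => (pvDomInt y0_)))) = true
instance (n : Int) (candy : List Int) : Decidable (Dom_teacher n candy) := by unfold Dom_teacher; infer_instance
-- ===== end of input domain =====

-- B fuses A's two passes (scatter into a tmp_list, then add it back) into one pass that threads the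
-- previous pile's even-adjusted value as a single accumulator (O(1) extra space, no tmp_list);
-- both mutate candy in place, equivalence is about the RETURN value (on success the contents coincide).

-- ===== PORT A =====
-- body of A's first for-loop (state: (tmp_list, candy))
def teacherStep (n : Int) (st : List Int × List Int) (i : Int) : List Int × List Int :=
  let tmp := st.1
  let cd := st.2
  let cd := if PySem.Int.mod (PySem.List.pyGetD cd i 0) 2 = 1 then
              PySem.List.pySetD cd i (PySem.List.pyGetD cd i 0 + 1)
            else cd
  let tmp := PySem.List.pySetD tmp (PySem.Int.mod (i + 1) n) (PySem.List.pyGetD cd i 0)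
  let cd := PySem.List.pySetD cd i (PySem.Int.floordiv (PySem.List.pyGetD cd i 0) 2)
  (tmp, cd)

-- body of A's second for-loop
def teacherAdd (tmp : List Int) (cd : List Int) (i : Int) : List Int :=
  PySem.List.pySetD cd i (PySem.List.pyGetD cd i 0 + PySem.List.pyGetD tmp i 0)

def teacher (n : Int) (candy : List Int) : List Int :=
  let tmp_list : List Int := (PySem.List.pyRange 0 n 1).map (fun _ => (0 : Int))
  let st := (PySem.List.pyRange 0 n 1).foldl (teacherStep n) (tmp_list, candy)
  (PySem.List.pyRange 0 n 1).foldl (teacherAdd st.1) st.2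

-- ===== PORT B =====
-- body of B's while-loop (state: (candy, prev))
def teacherAltStep (st : List Int × Int) (i : Int) : List Int × Int :=
  let c := PySem.List.pyGetD st.1 i 0
  let a := c + PySem.Int.mod c 2
  (PySem.List.pySetD st.1 i (PySem.Int.floordiv a 2 + st.2), a)

def teacher_alt (n : Int) (candy : List Int) : List Int :=
  if n ≤ 0 then candy
  else
    let c := PySem.List.pyGetD candy (n - 1) 0
    let prev := c + PySem.Int.mod c 2
    ((PySem.List.pyRange 0 n 1).foldl teacherAltStep (candy, prev)).1

-- ===== PRECONDITION & SPEC =====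
-- Pre_ excludes exactly the inputs with n > len(candy), on which Python A raises IndexError
-- (candy[i] for i ≥ len(candy)); B raises IndexError there too (candy[n-1] with n-1 ≥ len).
def Pre_teacher (n : Int) (candy : List Int) : Prop := n ≤ candy.length
instance (n : Int) (candy : List Int) : Decidable (Pre_teacher n candy) := by
  unfold Pre_teacher; infer_instance
def pvWitness_teacher : Int × List Int := (3, [1, 2, 3])
def Spec_teacher (n : Int) (candy : List Int) (out : List Int) : Prop := out = teacher_alt n candy
instance (n : Int) (candy : List Int) (out : List Int) : Decidable (Spec_teacher n candy out) := by
  unfold Spec_teacher; infer_instance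

-- ===== CLAIM (what is proved, stated in full; the proofs are below) =====
def Claim_equal_teacher : Prop := ∀ (n : Int) (candy : List Int), Dom_teacher n candy → Pre_teacher n candy → Spec_teacher n candy (teacher n candy)

-- ===== LEMMAS AND PROOFS =====

-- the even-adjusted value of a pile, and its half
def adjf (c : Int) : Int := c + PySem.Int.mod c 2
def hvf (c : Int) : Int := PySem.Int.floordiv (adjf c) 2

lemma mod_two_cases (c : Int) : PySem.Int.mod c 2 = 0 ∨ PySem.Int.mod c 2 = 1 := by
  rw [PySem.Int.mod_eq_emod_of_pos (by omega)]; omega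

lemma getD_mid (H R : List Int) (c : Int) (i : Nat) (hH : H.length = i) :
    PySem.List.pyGetD (H ++ c :: R) (i : Int) 0 = c := by
  rw [PySem.List.pyGetD_natCast, ← hH]
  simp [List.getD_eq_getElem?_getD]

lemma set_mid (H R : List Int) (c v : Int) (i : Nat) (hH : H.length = i) :
    PySem.List.pySetD (H ++ c :: R) (i : Int) v = H ++ v :: R := by
  rw [PySem.List.pySetD_natCast, ← hH]
  simp

lemma teacherStep_eval (n : Int) (tmp H R : List Int) (c : Int) (i : Nat)
    (hH : H.length = i) :
    teacherStep n (tmp, H ++ c :: R) (i : Int)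
      = (PySem.List.pySetD tmp (PySem.Int.mod ((i : Int) + 1) n) (adjf c),
         H ++ hvf c :: R) := by
  unfold teacherStep
  simp only []
  rw [getD_mid H R c i hH]
  rcases mod_two_cases c with h | h
  · rw [if_neg (by omega), getD_mid H R c i hH, set_mid H R c _ i hH]
    simp only [hvf, adjf, h, add_zero]
  · rw [if_pos h, set_mid H R c (c+1) i hH, getD_mid H R (c+1) i hH,
        set_mid H R (c+1) _ i hH]
    simp only [hvf, adjf, h]

lemma mod_small (a b : Int) (h0 : 0 ≤ a) (h1 : a < b) : PySem.Int.mod a b = a := by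
  rw [PySem.Int.mod_eq_emod_of_pos (by omega)]; exact Int.emod_eq_of_lt h0 h1

lemma drop_cons_of_lt (candy : List Int) (k : Nat) (hk : k < candy.length) :
    candy.drop k = candy[k] :: candy.drop (k + 1) :=
  List.drop_eq_getElem_cons hk

lemma loop1_inv (candy : List Int) (m : Nat) (k : Nat) (hk : k < m) (hm : m ≤ candy.length) :
    (PySem.List.pyRange 0 (k : Int) 1).foldl (teacherStep (m : Int)) (List.replicate m 0, candy)
      = (0 :: (candy.take k).map adjf ++ List.replicate (m - 1 - k) 0,
         (candy.take k).map hvf ++ candy.drop k) := by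
  induction k with
  | zero =>
    rw [show ((0:Nat):Int) = 0 by norm_num, PySem.List.pyRange_one_eq_nil (by omega)]
    simp only [List.foldl_nil, List.take_zero, List.map_nil, List.nil_append, List.drop_zero,
      Nat.sub_zero]
    obtain ⟨m', rfl⟩ : ∃ m', m = m' + 1 := ⟨m - 1, by omega⟩
    simp [List.replicate_succ]
  | succ k ih =>
    have hk' : k < m := by omega
    rw [show ((k+1:Nat):Int) = (k:Int) + 1 by push_cast; ring,
        PySem.List.pyRange_one_succ_right (by positivity), List.foldl_append, ih hk']
    simp only [List.foldl_cons, List.foldl_nil]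
    have hlen : ((candy.take k).map hvf).length = k := by
      simp [List.length_take]; omega
    rw [drop_cons_of_lt candy k (by omega), teacherStep_eval _ _ _ _ _ _ hlen]
    rw [Prod.mk.injEq]
    constructor
    · -- tmp component
      rw [mod_small _ _ (by positivity) (by exact_mod_cast by omega : ((k:Int)+1) < (m:Int))]
      rw [show ((k:Int) + 1) = ((k+1:Nat):Int) by push_cast; ring, PySem.List.pySetD_natCast]
      have h1 : m - 1 - k = (m - 1 - (k+1)) + 1 := by omega
      rw [h1, List.replicate_succ]
      have h2 : (0 :: (candy.take k).map adjf).length = k + 1 := by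
        simp [List.length_take]; omega
      rw [show (0 :: (candy.take k).map adjf) ++ 0 :: List.replicate (m-1-(k+1)) 0
            = ((0 :: (candy.take k).map adjf) ++ [0]) ++ List.replicate (m-1-(k+1)) 0 by simp,
          List.set_append_left _ _ (by simp [List.length_take]; omega),
          List.set_append_right _ _ (by simp [List.length_take])]
      have ha : List.map adjf (List.take (k+1) candy)
          = List.map adjf (List.take k candy) ++ [adjf candy[k]] := by
        rw [List.take_add_one, List.getElem?_eq_getElem (show k < candy.length by omega)]
        simp only [Option.toList_some, List.map_append, List.map_cons, List.map_nil]
      rw [ha]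
      simp [List.length_take, show min k candy.length = k by omega]
    · -- candy component
      have ht : List.map hvf (List.take (k+1) candy)
          = List.map hvf (List.take k candy) ++ [hvf candy[k]] := by
        rw [List.take_add_one, List.getElem?_eq_getElem (show k < candy.length by omega)]
        simp only [Option.toList_some, List.map_append, List.map_cons, List.map_nil]
      rw [ht]
      simp

lemma loop1_full (candy : List Int) (m : Nat) (hm : 0 < m) (hl : m ≤ candy.length) :
    (PySem.List.pyRange 0 (m : Int) 1).foldl (teacherStep (m : Int)) (List.replicate m 0, candy)
      = (adjf (candy.getD (m - 1) 0) :: (candy.take (m - 1)).map adjf,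
         (candy.take m).map hvf ++ candy.drop m) := by
  obtain ⟨k, rfl⟩ : ∃ k, m = k + 1 := ⟨m - 1, by omega⟩
  rw [show PySem.List.pyRange 0 ((k+1:Nat):Int) 1 = PySem.List.pyRange 0 ((k:Int)+1) 1 by norm_num,
      PySem.List.pyRange_one_succ_right (by positivity), List.foldl_append,
      loop1_inv candy (k+1) k (by omega) hl]
  simp only [List.foldl_cons, List.foldl_nil, Nat.add_sub_cancel, Nat.sub_self,
    List.replicate_zero, List.append_nil]
  have hlen : ((candy.take k).map hvf).length = k := by
    simp [List.length_take]; omega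
  rw [drop_cons_of_lt candy k (by omega), teacherStep_eval _ _ _ _ _ _ hlen]
  rw [Prod.mk.injEq]
  constructor
  · rw [show PySem.Int.mod ((k:Int) + 1) ((k+1:Nat):Int) = ((0:Nat):Int) by
          rw [PySem.Int.mod_eq_emod_of_pos (by positivity)]
          push_cast
          exact Int.emod_self,
        PySem.List.pySetD_natCast]
    simp [List.getD_eq_getElem?_getD, List.getElem?_eq_getElem (show k < candy.length by omega)]
  · have ha : List.map hvf (List.take (k+1) candy)
        = List.map hvf (List.take k candy) ++ [hvf candy[k]] := by
      rw [List.take_add_one, List.getElem?_eq_getElem (show k < candy.length by omega)]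
      simp only [Option.toList_some, List.map_append, List.map_cons, List.map_nil]
      rfl
    rw [ha]
    simp only [List.append_assoc, List.singleton_append]
    rfl

lemma teacherAdd_eval (tmp Z R : List Int) (x : Int) (j : Nat) (hZ : Z.length = j) :
    teacherAdd tmp (Z ++ x :: R) (j : Int) = Z ++ (x + tmp.getD j 0) :: R := by
  unfold teacherAdd
  rw [getD_mid Z R x j hZ, PySem.List.pyGetD_natCast, set_mid Z R x _ j hZ]

lemma loop2_inv (tmp : List Int) (X rest : List Int) (h : X.length ≤ tmp.length) :
    (PySem.List.pyRange 0 (X.length : Int) 1).foldl (teacherAdd tmp) (X ++ rest)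
      = (List.zipWith (· + ·) X (tmp.take X.length)) ++ rest := by
  induction X using List.reverseRecOn generalizing rest with
  | nil => simp [PySem.List.pyRange_one_eq_nil]
  | append_singleton Y x ih =>
    have hY : Y.length ≤ tmp.length := by simp at h; omega
    rw [List.length_append, List.length_singleton,
        show ((Y.length + 1 : Nat) : Int) = ((Y.length : Nat) : Int) + 1 by push_cast; ring,
        PySem.List.pyRange_one_succ_right (by positivity), List.foldl_append,
        List.append_assoc, List.singleton_append, ih (x :: rest) hY]
    simp only [List.foldl_cons, List.foldl_nil]
    have hz : (List.zipWith (· + ·) Y (tmp.take Y.length)).length = Y.length := by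
      simp [List.length_take]; omega
    rw [teacherAdd_eval tmp _ rest x Y.length hz]
    have ht : tmp.take (Y.length + 1) = tmp.take Y.length ++ [tmp.getD Y.length 0] := by
      rw [List.take_add_one, List.getElem?_eq_getElem (show Y.length < tmp.length by simp at h; omega)]
      simp [List.getD_eq_getElem?_getD, List.getElem?_eq_getElem (show Y.length < tmp.length by simp at h; omega)]
    rw [ht, List.zipWith_append (by simp [List.length_take]; omega)]
    simp

-- B's loop invariant: after k steps the first k slots hold their final values
-- zipped from halves and the stream x :: map adjf candy of give-away values,
-- and the accumulator is that stream's k-th element.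
lemma loopB_inv (candy : List Int) (x : Int) (k : Nat) (hk : k ≤ candy.length) :
    (PySem.List.pyRange 0 (k : Int) 1).foldl teacherAltStep (candy, x)
      = (List.zipWith (· + ·) ((candy.take k).map hvf) ((x :: candy.map adjf).take k)
           ++ candy.drop k,
         (x :: candy.map adjf).getD k 0) := by
  induction k with
  | zero =>
    rw [show ((0:Nat):Int) = 0 by norm_num, PySem.List.pyRange_one_eq_nil (by omega)]
    simp
  | succ k ih =>
    have hk' : k < candy.length := by omega
    rw [show ((k+1:Nat):Int) = (k:Int) + 1 by push_cast; ring,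
        PySem.List.pyRange_one_succ_right (by positivity), List.foldl_append, ih (by omega)]
    simp only [List.foldl_cons, List.foldl_nil]
    have hZ : (List.zipWith (· + ·) ((candy.take k).map hvf)
        ((x :: candy.map adjf).take k)).length = k := by
      simp [List.length_take]; omega
    rw [drop_cons_of_lt candy k hk']
    unfold teacherAltStep
    simp only []
    rw [getD_mid _ _ _ k hZ, set_mid _ _ _ _ k hZ]
    rw [Prod.mk.injEq]
    constructor
    · have hh : List.map hvf (List.take (k+1) candy)
          = List.map hvf (List.take k candy) ++ [hvf candy[k]] := by
        rw [List.take_add_one, List.getElem?_eq_getElem hk']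
        simp only [Option.toList_some, List.map_append, List.map_cons, List.map_nil]
      have hs : (x :: candy.map adjf).take (k+1)
          = (x :: candy.map adjf).take k ++ [(x :: candy.map adjf).getD k 0] := by
        rw [List.take_add_one,
            List.getElem?_eq_getElem (show k < (x :: candy.map adjf).length by simp; omega)]
        simp [List.getD_eq_getElem?_getD,
          List.getElem?_eq_getElem (show k < (x :: candy.map adjf).length by simp; omega)]
      rw [hh, hs, List.zipWith_append (by simp [List.length_take]; omega)]
      simp only [List.zipWith_cons_cons, List.zipWith_nil_right, List.append_assoc,
        List.singleton_append]
      simp only [hvf, adjf]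
    · -- accumulator: a = adjf candy[k] = stream.getD (k+1)
      show candy[k] + PySem.Int.mod candy[k] 2 = (x :: candy.map adjf).getD (k+1) 0
      simp [List.getD_eq_getElem?_getD, List.getElem?_eq_getElem hk', adjf]

lemma teq (n : Int) (candy : List Int) (hpre : n ≤ (candy.length : Int)) :
    teacher n candy = teacher_alt n candy := by
  by_cases hn : n ≤ 0
  · unfold teacher teacher_alt
    rw [PySem.List.pyRange_one_eq_nil hn]
    simp [hn]
  · obtain ⟨m, rfl⟩ : ∃ m : Nat, n = (m : Int) := ⟨n.toNat, by omega⟩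
    have hm : 0 < m := by omega
    have hl : m ≤ candy.length := by exact_mod_cast hpre
    have hX : ((candy.take m).map hvf).length = m := by simp [List.length_take]; omega
    have hT : (adjf (candy.getD (m - 1) 0) :: (candy.take (m - 1)).map adjf).length = m := by
      simp [List.length_take]; omega
    have htmp : (PySem.List.pyRange 0 ((m : Int)) 1).map (fun _ => (0:Int)) = List.replicate m 0 := by
      apply List.eq_replicate_iff.mpr
      constructor
      · simp [PySem.List.length_pyRange_one]
      · intro b hb
        simp at hb
        omega
    have hA : teacher (m : Int) candy
        = (List.zipWith (· + ·) ((candy.take m).map hvf)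
            (adjf (candy.getD (m - 1) 0) :: (candy.take (m - 1)).map adjf)) ++ candy.drop m := by
      unfold teacher
      dsimp only []
      rw [htmp, loop1_full candy m hm hl]
      dsimp only []
      rw [show ((m:Int)) = ((((candy.take m).map hvf).length : Nat) : Int) by rw [hX]]
      rw [loop2_inv _ _ _ (by rw [hX, hT])]
      rw [hX]
      rw [List.take_of_length_le (le_of_eq hT)]
    have hB : teacher_alt (m : Int) candy
        = (List.zipWith (· + ·) ((candy.take m).map hvf)
            (adjf (candy.getD (m - 1) 0) :: (candy.take (m - 1)).map adjf)) ++ candy.drop m := by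
      unfold teacher_alt
      rw [if_neg (by omega)]
      simp only []
      rw [show (m:Int) - 1 = ((m-1 : Nat) : Int) by omega, PySem.List.pyGetD_natCast]
      rw [show (m:Int) = ((m:Nat):Int) from rfl, loopB_inv candy _ m hl]
      dsimp only []
      rw [show (candy.getD (m-1) 0 + PySem.Int.mod (candy.getD (m-1) 0) 2)
            = adjf (candy.getD (m-1) 0) from rfl]
      -- stream.take m = adjf(candy[m-1]) :: (take (m-1) candy).map adjf
      have hstream : (adjf (candy.getD (m-1) 0) :: candy.map adjf).take m
          = adjf (candy.getD (m-1) 0) :: (candy.take (m-1)).map adjf := by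
        obtain ⟨m', hm'⟩ : ∃ m', m = m' + 1 := ⟨m-1, by omega⟩
        subst hm'
        simp [List.map_take]
      rw [hstream]
    rw [hA, hB]

-- ===== VERDICT (by name: the statement is the Claim_ definition above) =====
theorem teacher_spec : Claim_equal_teacher := by
  intro n candy _ hpre
  unfold Spec_teacher
  exact teq n candy hpre
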